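-- pv_equiv track=rewrite | github.com/PeterGeers/h-dcn | backend/handler/cognito_pre_signup/app.py | parse_federated_username
-- ===== SOURCE A (Python) =====
-- def parse_federated_username(username):
--     """
--     Parse provider name and user ID from federated username.
--     E.g. 'Google_112283382738141445724' -> ('Google', '112283382738141445724')
--     """
--     providers = ['Google', 'Facebook', 'SAML', 'LoginWithAmazon']
--     for provider in providers:
--         prefix = f"{provider}_"
--         if username.startswith(prefix):
--             user_id = username[len(prefix):]
--             return provider, user_id
--     return None, None
-- ===== SOURCE B (Python) =====
-- def parse_federated_username(username):
--     """
--     Parse provider name and user ID from federated username.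
--     E.g. 'Google_112283382738141445724' -> ('Google', '112283382738141445724')
--     """
--     providers = {'Google', 'Facebook', 'SAML', 'LoginWithAmazon'}
--     head, sep, tail = username.partition('_')
--     if sep and head in providers:
--         return head, tail
--     return None, None
-- ===== Notes on version B (the rewrite author's own statement) =====
-- stated objective: idiomatic
-- what changed: B replaces A's loop of four startswith prefix scans by one str.partition at the first underscore that extracts the candidate provider head, followed by a single set-membership test.
import Mathlib
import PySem

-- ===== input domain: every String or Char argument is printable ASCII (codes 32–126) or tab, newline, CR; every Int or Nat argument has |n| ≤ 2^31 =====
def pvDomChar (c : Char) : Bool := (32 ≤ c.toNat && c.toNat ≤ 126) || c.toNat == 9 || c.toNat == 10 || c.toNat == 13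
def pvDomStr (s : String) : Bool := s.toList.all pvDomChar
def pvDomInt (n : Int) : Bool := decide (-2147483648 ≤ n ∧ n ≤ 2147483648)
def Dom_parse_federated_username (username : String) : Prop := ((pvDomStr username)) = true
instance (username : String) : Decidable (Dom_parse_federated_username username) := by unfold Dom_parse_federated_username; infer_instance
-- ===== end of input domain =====

-- B replaces A's four-iteration startswith loop by one partition at the first '_' plus a
-- membership test on the extracted head (objective: alternative/idiomatic, same cost).

-- ===== PORT A =====
-- the for-loop over providers with early return, as structural recursion
def pvGoA (username : String) : List String → Option String × Option String
  | [] => (none, none)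
  | provider :: rest =>
    let pre := provider ++ "_"                               -- f"{provider}_"
    if PySem.Str.startswith username pre then
      (some provider, some (PySem.Str.slice username (some (PySem.Str.len pre : Int)) none))  -- username[len(prefix):]
    else pvGoA username rest

def parse_federated_username (username : String) : Option String × Option String :=
  pvGoA username ["Google", "Facebook", "SAML", "LoginWithAmazon"]

-- ===== PORT B =====
-- username.partition('_') for the one-char separator '_', ported exactly:
-- head = chars before the first '_'; the match on dropWhile is the 'was a separator found?' test
def parse_federated_username_alt (username : String) : Option String × Option String :=
  let cs := username.toList
  let head := cs.takeWhile (· != '_')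
  match cs.dropWhile (· != '_') with
  | [] => (none, none)                                       -- no separator: sep == ''
  | _ :: tail =>
    let h := String.ofList head
    if h ∈ ["Google", "Facebook", "SAML", "LoginWithAmazon"] then (some h, some (String.ofList tail))
    else (none, none)

-- ===== PRECONDITION & SPEC =====
def Spec_parse_federated_username (username : String) (out : Option String × Option String) : Prop := out = parse_federated_username_alt username
instance (username : String) (out : Option String × Option String) : Decidable (Spec_parse_federated_username username out) := by unfold Spec_parse_federated_username; infer_instance

-- ===== CLAIM (what is proved, stated in full; the proofs are below) =====
def Claim_equal_parse_federated_username : Prop := ∀ (username : String), Dom_parse_federated_username username → Spec_parse_federated_username username (parse_federated_username username)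

-- ===== LEMMAS AND PROOFS =====

-- partitioning a list whose shape 'a ++ '_' :: x' is known, with a '_'-free
theorem pv_takeWhile_append (a x : List Char) (ha : ∀ c ∈ a, c ≠ '_') :
    (a ++ '_' :: x).takeWhile (· != '_') = a ∧ (a ++ '_' :: x).dropWhile (· != '_') = '_' :: x := by
  induction a with
  | nil => simp
  | cons c a ih =>
    have hc : c ≠ '_' := ha c (by simp)
    have := ih (fun d hd => ha d (by simp [hd]))
    simp [hc, this.1, this.2]

-- A's startswith test, characterised through the shape of the char list
theorem pv_startswith_iff (s p : String) (_hp : ∀ c ∈ p.toList, c ≠ '_') :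
    PySem.Str.startswith s (p ++ "_") = true ↔ ∃ t, s.toList = p.toList ++ '_' :: t := by
  rw [show PySem.Str.startswith s (p ++ "_") = PySem.Chars.startswith s.toList (p ++ "_").toList from by simp,
      PySem.Chars.startswith_iff]
  constructor
  · rintro ⟨t, ht⟩
    exact ⟨t, by simpa using ht.symm⟩
  · rintro ⟨t, ht⟩
    exact ⟨t, by simp [ht]⟩

-- A's slice on the matched shape
theorem pv_slice_eq (s p : String) (t : List Char) (ht : s.toList = p.toList ++ '_' :: t) :
    PySem.Str.slice s (some (PySem.Str.len (p ++ "_") : Int)) none = String.ofList t := by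
  have hlen : (PySem.Str.len (p ++ "_") : Int) = ((p.toList.length + 1 : Nat) : Int) := by
    simp [PySem.Str.len_eq]
  apply String.toList_injective
  rw [show (PySem.Str.slice s (some (PySem.Str.len (p ++ "_") : Int)) none).toList
        = PySem.Chars.slice s.toList (some (PySem.Str.len (p ++ "_") : Int)) none from by simp,
      PySem.Chars.slice_eq_listSlice, hlen, PySem.List.slice_from_natCast]
  rw [ht, show p.toList ++ '_' :: t = (p.toList ++ ['_']) ++ t from by simp]
  rw [show p.toList.length + 1 = (p.toList ++ ['_']).length from by simp, List.drop_left]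
  simp

-- per-provider characterisation of A's branch, given the partition of username at its first '_'
theorem pv_key (username p : String) (hp : ('_' : Char) ∉ p.toList)
    (h t : List Char) (hshape : username.toList = h ++ '_' :: t) (hhfree : ∀ c ∈ h, c ≠ '_') :
    (PySem.Str.startswith username (p ++ "_") = true ↔ h = p.toList) ∧
    (h = p.toList → PySem.Str.slice username (some (PySem.Str.len (p ++ "_") : Int)) none = String.ofList t) := by
  have hp' : ∀ c ∈ p.toList, c ≠ '_' := fun c hc he => hp (he ▸ hc)
  constructor
  · constructor
    · intro hsw
      obtain ⟨u, hu⟩ := (pv_startswith_iff username p hp').mp hsw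
      rw [hshape] at hu
      calc h = ((h ++ '_' :: t).takeWhile (· != '_')) := (pv_takeWhile_append h t hhfree).1.symm
        _ = ((p.toList ++ '_' :: u).takeWhile (· != '_')) := by rw [hu]
        _ = p.toList := (pv_takeWhile_append p.toList u hp').1
    · intro he
      exact (pv_startswith_iff username p hp').mpr ⟨t, by rw [hshape, he]⟩
  · intro he
    exact pv_slice_eq username p t (by rw [hshape, he])

theorem pv_main (username : String) :
    parse_federated_username username = parse_federated_username_alt username := by
  unfold parse_federated_username parse_federated_username_alt
  cases hr : username.toList.dropWhile (· != '_') with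
  | nil =>
    -- no '_' in username at all: every startswith is false
    have hall : ∀ c ∈ username.toList, c ≠ '_' := by
      intro c hc
      have htw : username.toList.takeWhile (· != '_') = username.toList := by
        have := List.takeWhile_append_dropWhile (p := (· != '_')) (l := username.toList)
        rw [hr] at this; simpa using this
      have hmem : c ∈ username.toList.takeWhile (· != '_') := by rw [htw]; exact hc
      simpa using List.mem_takeWhile_imp hmem
    have hfalse : ∀ p : String, (∀ c ∈ p.toList, c ≠ '_') →
        PySem.Str.startswith username (p ++ "_") = false := by
      intro p hp
      rw [Bool.eq_false_iff]
      intro hsw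
      obtain ⟨t, ht⟩ := (pv_startswith_iff username p hp).mp hsw
      exact hall '_' (by rw [ht]; simp) rfl
    have hG := hfalse "Google" (by intro c hc he; rw [he] at hc; simp at hc)
    have hF := hfalse "Facebook" (by intro c hc he; rw [he] at hc; simp at hc)
    have hS := hfalse "SAML" (by intro c hc he; rw [he] at hc; simp at hc)
    have hL := hfalse "LoginWithAmazon" (by intro c hc he; rw [he] at hc; simp at hc)
    have hG' := hG; have hF' := hF; have hS' := hS; have hL' := hL
    simp at hG' hF' hS' hL'
    simp [pvGoA, hG', hF', hS', hL', hr]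
  | cons c tail =>
    have hc : c = '_' := by
      have hne := List.head_dropWhile_not (p := (· != '_')) (l := username.toList) (by simp [hr])
      simp [hr] at hne; exact hne
    subst hc
    have hshape : username.toList = username.toList.takeWhile (· != '_') ++ '_' :: tail := by
      conv_lhs => rw [← List.takeWhile_append_dropWhile (p := (· != '_')) (l := username.toList)]
      rw [hr]
    have hhfree : ∀ c ∈ username.toList.takeWhile (· != '_'), c ≠ '_' := by
      intro c hcm; simpa using List.mem_takeWhile_imp hcm
    have kG := pv_key username "Google" (by simp) _ tail hshape hhfree
    have kF := pv_key username "Facebook" (by simp) _ tail hshape hhfree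
    have kS := pv_key username "SAML" (by simp) _ tail hshape hhfree
    have kL := pv_key username "LoginWithAmazon" (by simp) _ tail hshape hhfree
    by_cases hG : username.toList.takeWhile (· != '_') = "Google".toList
    · have sw := kG.1.mpr hG
      have sl := kG.2 hG
      simp at sw sl
      simp [pvGoA, sw, sl, hr, hG]
    · have gG : PySem.Str.startswith username ("Google" ++ "_") = false := by
        rw [Bool.eq_false_iff]; exact fun hsw => hG (kG.1.mp hsw)
      have gGn := gG; simp at gGn
      by_cases hF : username.toList.takeWhile (· != '_') = "Facebook".toList
      · have sw := kF.1.mpr hF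
        have sl := kF.2 hF
        simp at sw sl
        simp [pvGoA, sw, sl, hr, hF, gGn]
      · have gF : PySem.Str.startswith username ("Facebook" ++ "_") = false := by
          rw [Bool.eq_false_iff]; exact fun hsw => hF (kF.1.mp hsw)
        have gFn := gF; simp at gFn
        by_cases hS : username.toList.takeWhile (· != '_') = "SAML".toList
        · have sw := kS.1.mpr hS
          have sl := kS.2 hS
          simp at sw sl
          simp [pvGoA, sw, sl, hr, hS, gGn, gFn]
        · have gS : PySem.Str.startswith username ("SAML" ++ "_") = false := by
            rw [Bool.eq_false_iff]; exact fun hsw => hS (kS.1.mp hsw)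
          have gSn := gS; simp at gSn
          by_cases hL : username.toList.takeWhile (· != '_') = "LoginWithAmazon".toList
          · have sw := kL.1.mpr hL
            have sl := kL.2 hL
            simp at sw sl
            simp [pvGoA, sw, sl, hr, hL, gGn, gFn, gSn]
          · have gL : PySem.Str.startswith username ("LoginWithAmazon" ++ "_") = false := by
              rw [Bool.eq_false_iff]; exact fun hsw => hL (kL.1.mp hsw)
            have gLn := gL; simp at gLn
            have hnm : String.ofList (username.toList.takeWhile (· != '_'))
                ∉ ["Google", "Facebook", "SAML", "LoginWithAmazon"] := by
              intro hmem
              simp only [List.mem_cons, List.not_mem_nil, or_false] at hmem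
              rcases hmem with h1 | h1 | h1 | h1
              · exact hG (by have := congrArg String.toList h1; simpa using this)
              · exact hF (by have := congrArg String.toList h1; simpa using this)
              · exact hS (by have := congrArg String.toList h1; simpa using this)
              · exact hL (by have := congrArg String.toList h1; simpa using this)
            simp [pvGoA, gGn, gFn, gSn, gLn, hr, hnm]

-- ===== VERDICT (by name: the statement is the Claim_ definition above) =====
theorem parse_federated_username_spec : Claim_equal_parse_federated_username := by
  intro username _
  exact pv_main username
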